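-- pv_equiv track=rewrite | github.com/Instech-Sol-Private-Limited/Anamcara-Ai | app/services/numerology_service.py | soul_urge
-- ===== SOURCE A (Python) =====
-- def reduce_to_single_digit(n: int) -> int:
--     """Reduce number to single digit (except master numbers 11, 22, 33)"""
--     while n > 9 and n not in [11, 22, 33]:
--         n = sum(int(digit) for digit in str(n))
--     return n
--
-- def soul_urge(name: str) -> int:
--     """
--     Calculate Soul Urge (Heart's Desire) number from vowels in name
--     """
--     vowels = 'AEIOU'
--     letter_values = {
--         'A': 1, 'E': 5, 'I': 9, 'O': 6, 'U': 3
--     }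
--
--     total = 0
--     for char in name.upper():
--         if char in vowels:
--             total += letter_values[char]
--
--     return reduce_to_single_digit(total)
-- ===== SOURCE B (Python) =====
-- VOWEL_VALUES = {'A': 1, 'E': 5, 'I': 9, 'O': 6, 'U': 3}
--
-- def _reduce(n):
--     if n <= 9 or n in (11, 22, 33):
--         return n
--     return _reduce(sum(int(d) for d in str(n)))
--
-- def soul_urge(name):
--     return _reduce(sum(VOWEL_VALUES.get(c, 0) for c in name.upper()))
-- ===== Notes on version B (the rewrite author's own statement) =====
-- stated objective: simpler
-- what changed: The vowel loop with a membership test plus dict indexing becomes a single sum over dict.get, and the iterative while-loop digit reduction becomes a recursive digital-root helper.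
import Mathlib
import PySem

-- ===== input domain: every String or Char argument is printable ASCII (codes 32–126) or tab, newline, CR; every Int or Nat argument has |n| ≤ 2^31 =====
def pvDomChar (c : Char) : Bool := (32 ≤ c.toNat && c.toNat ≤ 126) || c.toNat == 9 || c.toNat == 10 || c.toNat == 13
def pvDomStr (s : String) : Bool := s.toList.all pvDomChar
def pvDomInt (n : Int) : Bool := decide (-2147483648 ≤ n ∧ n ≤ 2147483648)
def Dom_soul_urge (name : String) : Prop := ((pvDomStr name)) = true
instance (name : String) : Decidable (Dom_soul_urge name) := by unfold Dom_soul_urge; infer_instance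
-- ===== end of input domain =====

-- B rewrites A with a sum over dict.get instead of the membership-guarded loop, and a recursive
-- digital-root helper instead of the while loop; same cost, simpler decomposition.


-- ===== PORT A =====
-- Port of A. Both digit-reduction loops use fuel n.toNat, which always exceeds the number of
-- iterations (the digit sum of n > 9 is < n, so each pass strictly shrinks n).
-- int(digit): each digit of str(n) is a digit char here (the sums are ≥ 0), so ofChars? never
-- fails and the .getD 0 is unreachable; exact on every reachable state.
def pvDigitSum (n : Int) : Int :=
  ((PySem.Int.toChars n).map (fun d => (PySem.Int.ofChars? [d]).getD 0)).sum

def reduce_to_single_digit_loop (fuel : Nat) (n : Int) : Int :=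
  match fuel with
  | 0 => n
  | f + 1 =>
    if n > 9 ∧ ¬(n = 11 ∨ n = 22 ∨ n = 33) then
      reduce_to_single_digit_loop f (pvDigitSum n)
    else n

def reduce_to_single_digit (n : Int) : Int :=
  reduce_to_single_digit_loop n.toNat n

def soul_urge (name : String) : Int :=
  let vowels := "AEIOU"
  let letter_values : PySem.Dict Char Int :=
    PySem.Dict.ofList [('A', 1), ('E', 5), ('I', 9), ('O', 6), ('U', 3)]
  -- letter_values[char]: guarded by char ∈ vowels, so get? always succeeds; .getD 0 unreachable
  let total := (PySem.Str.upper name).toList.foldl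
    (fun total char =>
      if char ∈ vowels.toList then total + (letter_values.get? char).getD 0 else total) 0
  reduce_to_single_digit total

-- ===== PORT B =====
def pvVowelValues : PySem.Dict Char Int :=
  PySem.Dict.ofList [('A', 1), ('E', 5), ('I', 9), ('O', 6), ('U', 3)]

def pvReduce (fuel : Nat) (n : Int) : Int :=
  match fuel with
  | 0 => n
  | f + 1 =>
    if n ≤ 9 ∨ n = 11 ∨ n = 22 ∨ n = 33 then n
    else pvReduce f (pvDigitSum n)

def soul_urge_alt (name : String) : Int :=
  let total := ((PySem.Str.upper name).toList.map (fun c => pvVowelValues.getD c 0)).sum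
  pvReduce total.toNat total

-- ===== PRECONDITION & SPEC =====
def Spec_soul_urge (name : String) (out : Int) : Prop := out = soul_urge_alt name
instance (name : String) (out : Int) : Decidable (Spec_soul_urge name out) := by unfold Spec_soul_urge; infer_instance

-- ===== CLAIM (what is proved, stated in full; the proofs are below) =====
def Claim_equal_soul_urge : Prop := ∀ (name : String), Dom_soul_urge name → Spec_soul_urge name (soul_urge name)

-- ===== LEMMAS AND PROOFS =====

lemma reduce_eq (fuel : Nat) (n : Int) :
    reduce_to_single_digit_loop fuel n = pvReduce fuel n := by
  induction fuel generalizing n with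
  | zero => rfl
  | succ f ih =>
    simp only [reduce_to_single_digit_loop, pvReduce]
    by_cases h : n ≤ 9 ∨ n = 11 ∨ n = 22 ∨ n = 33
    · rw [if_neg (by omega), if_pos h]
    · rw [if_pos (by omega), if_neg h, ih]

lemma step_eq (acc : Int) (c : Char) :
    (if c ∈ "AEIOU".toList then
        acc + ((PySem.Dict.ofList [('A', 1), ('E', 5), ('I', 9), ('O', 6), ('U', 3)] :
          PySem.Dict Char Int).get? c).getD 0
      else acc) = acc + pvVowelValues.getD c 0 := by
  by_cases hA : c = 'A'
  · subst hA; simp [pvVowelValues, PySem.Dict.getD, PySem.Dict.ofList]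
  by_cases hE : c = 'E'
  · subst hE; simp [pvVowelValues, PySem.Dict.getD, PySem.Dict.ofList]
  by_cases hI : c = 'I'
  · subst hI; simp [pvVowelValues, PySem.Dict.getD, PySem.Dict.ofList]
  by_cases hO : c = 'O'
  · subst hO; simp [pvVowelValues, PySem.Dict.getD, PySem.Dict.ofList]
  by_cases hU : c = 'U'
  · subst hU; simp [pvVowelValues, PySem.Dict.getD, PySem.Dict.ofList]
  have hm : c ∉ "AEIOU".toList := by
    have hs : "AEIOU".toList = ['A', 'E', 'I', 'O', 'U'] := rfl
    rw [hs]; simp [hA, hE, hI, hO, hU]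
  rw [if_neg hm]
  have hmk : pvVowelValues = PySem.Dict.mk [('A', 1), ('E', 5), ('I', 9), ('O', 6), ('U', 3)] := by
    rfl
  have h0 : pvVowelValues.getD c 0 = 0 := by
    rw [hmk, PySem.Dict.getD_eq_get?_getD]
    simp [PySem.Dict.get?, beq_iff_eq, Ne.symm hA, Ne.symm hE, Ne.symm hI, Ne.symm hO,
      Ne.symm hU]
  omega

lemma total_eq (name : String) :
    (PySem.Str.upper name).toList.foldl
      (fun total char =>
        if char ∈ "AEIOU".toList then
          total + ((PySem.Dict.ofList [('A', 1), ('E', 5), ('I', 9), ('O', 6), ('U', 3)] :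
            PySem.Dict Char Int).get? char).getD 0
        else total) 0
    = ((PySem.Str.upper name).toList.map (fun c => pvVowelValues.getD c 0)).sum := by
  have h := PySem.List.foldl_congr_mem
    (l := (PySem.Str.upper name).toList) (init := (0 : Int))
    (f := fun total char =>
      if char ∈ "AEIOU".toList then
        total + ((PySem.Dict.ofList [('A', 1), ('E', 5), ('I', 9), ('O', 6), ('U', 3)] :
          PySem.Dict Char Int).get? char).getD 0
      else total)
    (g := fun acc c => acc + pvVowelValues.getD c 0)
    (fun acc x _ => step_eq acc x)
  rw [h, PySem.List.foldl_add]
  simp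

-- ===== VERDICT (by name: the statement is the Claim_ definition above) =====
theorem soul_urge_spec : Claim_equal_soul_urge := by
  intro name _
  unfold Spec_soul_urge soul_urge soul_urge_alt reduce_to_single_digit
  simp only [total_eq, reduce_eq]
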